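-- pv_equiv track=rewrite | github.com/padawin/AdventOfCode | 2017/day21.py | _matrices_are_mirror
-- ===== SOURCE A (Python) =====
-- def _rotate_clockwise(matrix):
--     return [''.join(line) for line in zip(*matrix[::-1])]
--
-- def _matrices_are_mirror(matrix1, matrix2):
--     matrix1 = matrix1[::-1]
--     orig = matrix1
--     while matrix1 != matrix2:
--         matrix1 = _rotate_clockwise(matrix1)
--         if matrix1 == orig:
--             break
--     return matrix1 == matrix2
-- ===== SOURCE B (Python) =====
-- def _matrices_are_mirror(matrix1, matrix2):
--     # Compare matrix2 against the four rotational orientations of the mirrored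
--     # matrix1 by index arithmetic alone: no rotated matrix is ever built.
--     mirror = matrix1[::-1]
--     r = len(mirror)
--     c = len(mirror[0]) if mirror else 0
--
--     def cell(k, i, j):
--         # element (i, j) of the k-th clockwise rotation of `mirror`
--         if k == 0:
--             return mirror[i][j]
--         if k == 1:
--             return mirror[r - 1 - j][i]
--         if k == 2:
--             return mirror[r - 1 - i][c - 1 - j]
--         return mirror[j][c - 1 - i]
--
--     for k in range(4):
--         rows, cols = (r, c) if k % 2 == 0 else (c, r)
--         if len(matrix2) == rows and all(
--             len(matrix2[i]) == cols
--             and all(matrix2[i][j] == cell(k, i, j) for j in range(cols))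
--             for i in range(rows)
--         ):
--             return True
--     return False
-- ===== Notes on version B (the rewrite author's own statement) =====
-- stated objective: alternative
-- what changed: B never constructs a rotated matrix: it compares matrix2 against each of the four orientations of the mirrored matrix1 purely by index arithmetic (cell (i,j) of rotation k read directly from mirror), replacing A's repeated zip/join rotation building and while-loop cycle detection.
-- outside the precondition, e.g. on _matrices_are_mirror(['ab', 'c'], ['c', 'ab']): A returns True, B returns False; on _matrices_are_mirror(['', ''], ['x']): A does not finish within the time limit, B returns False
import Mathlib
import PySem

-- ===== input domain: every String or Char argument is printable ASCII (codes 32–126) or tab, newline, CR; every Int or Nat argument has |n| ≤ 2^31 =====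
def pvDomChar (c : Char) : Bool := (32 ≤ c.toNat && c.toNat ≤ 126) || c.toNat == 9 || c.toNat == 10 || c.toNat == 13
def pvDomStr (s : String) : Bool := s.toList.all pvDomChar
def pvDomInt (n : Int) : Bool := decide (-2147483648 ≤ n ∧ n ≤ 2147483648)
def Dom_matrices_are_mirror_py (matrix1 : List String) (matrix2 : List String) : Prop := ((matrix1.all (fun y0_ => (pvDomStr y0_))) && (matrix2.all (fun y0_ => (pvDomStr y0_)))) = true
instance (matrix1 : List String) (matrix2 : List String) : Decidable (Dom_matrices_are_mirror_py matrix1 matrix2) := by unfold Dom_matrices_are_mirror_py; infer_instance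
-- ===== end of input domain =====

-- B compares matrix2 against the four orientations of the mirrored matrix1 by pure
-- index arithmetic, never building a rotated matrix (objective: alternative algorithm).


-- ===== PORT A =====
-- Hand port of Python's zip(*rows) over lists of characters: it stops at the shortest
-- row (exact Python semantics). The fuel is the length of the first row, which bounds
-- the number of produced tuples exactly, so the result is identical to Python's zip.
def pyZipN : Nat → List (List Char) → List (List Char)
  | 0, _ => []
  | n+1, rows =>
      if rows.isEmpty || rows.any (fun r => r.isEmpty) then []
      else rows.map (fun r => r.headD ' ') :: pyZipN n (rows.map (fun r => r.tail))

def pyZip (rows : List (List Char)) : List (List Char) :=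
  pyZipN ((rows.headD []).length) rows

-- _rotate_clockwise: [''.join(line) for line in zip(*matrix[::-1])]
def rotateCW (matrix : List String) : List String :=
  (pyZip ((matrix.reverse).map String.toList)).map (fun line => String.ofList line)

-- A's while-loop.  The fuel 4 only makes the recursion total: under Pre_ the loop
-- always hits its own exit (match or cycle-detection break) within 4 rotations.
def aLoop : Nat → List String → List String → List String → List String
  | 0, m, _, _ => m
  | f+1, m, orig, m2 =>
      if m = m2 then m
      else
        let m' := rotateCW m
        if m' = orig then m' else aLoop f m' orig m2

def matrices_are_mirror_py (matrix1 : List String) (matrix2 : List String) : Bool :=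
  let mir := matrix1.reverse
  decide (aLoop 4 mir mir matrix2 = matrix2)

-- ===== PORT B =====
-- cell(k, i, j): element (i, j) of the k-th clockwise rotation of `mirror`
def bCell (mir : List (List Char)) (r c k i j : Nat) : Char :=
  if k = 0 then (mir.getD i []).getD j ' '
  else if k = 1 then (mir.getD (r - 1 - j) []).getD i ' '
  else if k = 2 then (mir.getD (r - 1 - i) []).getD (c - 1 - j) ' '
  else (mir.getD j []).getD (c - 1 - i) ' '

-- the body of B's loop for one k: dimension check plus per-cell comparison
def bMatch (mir m2 : List (List Char)) (r c k : Nat) : Bool :=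
  let rows := if k % 2 = 0 then r else c
  let cols := if k % 2 = 0 then c else r
  decide (m2.length = rows) &&
  (List.range rows).all (fun i =>
    decide ((m2.getD i []).length = cols) &&
    (List.range cols).all (fun j =>
      decide ((m2.getD i []).getD j ' ' = bCell mir r c k i j)))

def matrices_are_mirror_py_alt (matrix1 : List String) (matrix2 : List String) : Bool :=
  let mir := (matrix1.reverse).map String.toList
  let m2 := matrix2.map String.toList
  (List.range 4).any (fun k => bMatch mir m2 mir.length (mir.headD []).length k)

-- ===== PRECONDITION & SPEC =====
-- Pre_ excludes matrix1 that is ragged (rows of unequal length) or has zero-width rows: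
-- there Python zip's truncation makes A's rotation non-cyclic, so A diverges for most
-- matrix2 (e.g. (['',''], ['x'])), and where it does return it compares truncated
-- rotations that B's by-index reading of the intact mirror does not reproduce.
def Pre_matrices_are_mirror_py (matrix1 : List String) (matrix2 : List String) : Prop :=
  matrix1 = [] ∨
    (0 < (matrix1.headD "").toList.length ∧
      ∀ s ∈ matrix1, s.toList.length = (matrix1.headD "").toList.length)
instance (matrix1 : List String) (matrix2 : List String) : Decidable (Pre_matrices_are_mirror_py matrix1 matrix2) := by unfold Pre_matrices_are_mirror_py; infer_instance

def pvWitness_matrices_are_mirror_py : List String × List String := (["ab", "cd"], ["dc", "ba"])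

def Spec_matrices_are_mirror_py (matrix1 : List String) (matrix2 : List String) (out : Bool) : Prop := out = matrices_are_mirror_py_alt matrix1 matrix2
instance (matrix1 : List String) (matrix2 : List String) (out : Bool) : Decidable (Spec_matrices_are_mirror_py matrix1 matrix2 out) := by unfold Spec_matrices_are_mirror_py; infer_instance

-- ===== CLAIM (what is proved, stated in full; the proofs are below) =====
def Claim_equal_matrices_are_mirror_py : Prop := ∀ (matrix1 : List String) (matrix2 : List String), Dom_matrices_are_mirror_py matrix1 matrix2 → Pre_matrices_are_mirror_py matrix1 matrix2 → Spec_matrices_are_mirror_py matrix1 matrix2 (matrices_are_mirror_py matrix1 matrix2)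

-- ===== LEMMAS AND PROOFS =====

-- characterization of pyZipN on rectangular nonempty input
theorem pyZipN_rect (n : Nat) (rows : List (List Char)) (hne : rows ≠ [])
    (hlen : ∀ r ∈ rows, r.length = n) :
    pyZipN n rows = (List.range n).map (fun j => rows.map (fun r => r.getD j ' ')) := by
  induction n generalizing rows with
  | zero => simp [pyZipN]
  | succ n ih =>
    have hanye : (rows.any (fun r => r.isEmpty)) = false := by
      simp only [List.any_eq_false]
      intro r hr
      have := hlen r hr
      cases r with
      | nil => simp at this
      | cons a t => simp
    have hie : rows.isEmpty = false := by
      cases rows with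
      | nil => exact absurd rfl hne
      | cons a t => simp
    rw [pyZipN, hie, hanye]
    simp only [Bool.false_or, if_neg (by simp : ¬ (false = true))]
    rw [List.range_succ_eq_map]
    simp only [List.map_cons, List.map_map]
    congr 1
    · apply List.map_congr_left
      intro r hr
      have := hlen r hr
      cases r with
      | nil => simp at this
      | cons a t => simp
    · rw [ih (rows.map (fun r => r.tail)) (by simp [hne])
        (by intro r hr
            simp only [List.mem_map] at hr
            obtain ⟨r0, hr0, rfl⟩ := hr
            have := hlen r0 hr0
            cases r0 with
            | nil => simp at this
            | cons a t => simpa using this)]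
      apply List.map_congr_left
      intro j _
      simp only [Function.comp_apply, List.map_map]
      apply List.map_congr_left
      intro r hr
      cases r with
      | nil => simp
      | cons a t => simp

theorem pyZip_rect (n : Nat) (rows : List (List Char)) (hne : rows ≠ [])
    (hlen : ∀ r ∈ rows, r.length = n) :
    pyZip rows = (List.range n).map (fun j => rows.map (fun r => r.getD j ' ')) := by
  unfold pyZip
  have : (rows.headD []).length = n := by
    cases rows with
    | nil => exact absurd rfl hne
    | cons a t => exact hlen a (by simp)
  rw [this]
  exact pyZipN_rect n rows hne hlen

-- rotation at the List (List Char) level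
def rotL (rows : List (List Char)) : List (List Char) := pyZip rows.reverse

theorem rotL_rect (n : Nat) (rows : List (List Char)) (hne : rows ≠ [])
    (hlen : ∀ r ∈ rows, r.length = n) :
    rotL rows = (List.range n).map (fun j => rows.reverse.map (fun r => r.getD j ' ')) := by
  unfold rotL
  exact pyZip_rect n rows.reverse (by simpa using hne) (by intro r hr; exact hlen r (by simpa using hr))

theorem rotL_two (n : Nat) (rows : List (List Char)) (hne : rows ≠ []) (hn : 0 < n)
    (hlen : ∀ r ∈ rows, r.length = n) :
    rotL (rotL rows) = rows.reverse.map List.reverse := by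
  have hr0 : 0 < rows.length := List.length_pos_iff.mpr hne
  rw [rotL_rect n rows hne hlen]
  rw [rotL_rect rows.length ((List.range n).map (fun j => rows.reverse.map (fun r => r.getD j ' ')))
      (by simp; omega)
      (by intro r hr
          simp only [List.mem_map, List.mem_range] at hr
          obtain ⟨j, hj, rfl⟩ := hr
          simp)]
  apply List.ext_getElem
  · simp
  · intro i h1 h2
    simp only [List.length_map, List.length_range] at h1 h2
    have hi : i < rows.length := h1
    have hir : i < rows.reverse.length := by simpa using hi
    have hmem : rows.reverse[i] ∈ rows := List.mem_reverse.mp (List.getElem_mem hir)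
    have hlenI : (rows.reverse[i]).length = n := hlen _ hmem
    simp only [List.getElem_map, List.getElem_range]
    apply List.ext_getElem
    · have hklt : rows.length - 1 - i < rows.length := by omega
      exact (by simpa using (hlen _ (List.getElem_mem hklt)).symm)
    · intro j hj1 hj2
      simp only [List.length_map, List.length_reverse, List.length_range] at hj1 hj2
      have hklt : rows.length - 1 - i < rows.length := by omega
      have hlenK : (rows[rows.length - 1 - i]'hklt).length = n := hlen _ (List.getElem_mem hklt)
      have hjn : j < n := hlenI ▸ hj2
      have hrev : ((List.range n).map (fun j => rows.reverse.map (fun r => r.getD j ' '))).reverse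
          = (List.range n).reverse.map (fun j => rows.reverse.map (fun r => r.getD j ' ')) := by
        rw [List.map_reverse]
      simp only [hrev, List.getElem_map, List.getElem_reverse, List.getElem_range,
        List.length_map, List.length_range, List.length_reverse]
      rw [List.getD_eq_getElem _ _ (by simpa using hi), List.getElem_map]
      simp only [List.getElem_reverse, hlenK]
      rw [List.getD_eq_getElem _ _ (by rw [hlenK]; omega)]

theorem rotL_four (n : Nat) (rows : List (List Char)) (hne : rows ≠ []) (hn : 0 < n)
    (hlen : ∀ r ∈ rows, r.length = n) :
    rotL (rotL (rotL (rotL rows))) = rows := by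
  rw [rotL_two n rows hne hn hlen]
  rw [rotL_two n (rows.reverse.map List.reverse) (by simp [hne]) hn
      (by intro r hr
          simp only [List.mem_map, List.mem_reverse] at hr
          obtain ⟨a, ha, rfl⟩ := hr
          simpa using hlen a ha)]
  simp [List.map_reverse, List.map_map]

theorem pvMapToListOfList (x : List (List Char)) :
    (x.map String.ofList).map String.toList = x := by
  simp [List.map_map, Function.comp_def, String.toList_ofList]

theorem rotateCW_as_rotL (m : List String) :
    rotateCW m = (rotL (m.map String.toList)).map String.ofList := by
  unfold rotateCW rotL
  rw [List.map_reverse]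

-- numeral unfolding equations for A's loop
theorem aLoop4 (m o m2 : List String) : aLoop 4 m o m2 = if m = m2 then m else (if rotateCW m = o then rotateCW m else aLoop 3 (rotateCW m) o m2) := rfl
theorem aLoop3 (m o m2 : List String) : aLoop 3 m o m2 = if m = m2 then m else (if rotateCW m = o then rotateCW m else aLoop 2 (rotateCW m) o m2) := rfl
theorem aLoop2 (m o m2 : List String) : aLoop 2 m o m2 = if m = m2 then m else (if rotateCW m = o then rotateCW m else aLoop 1 (rotateCW m) o m2) := rfl
theorem aLoop1 (m o m2 : List String) : aLoop 1 m o m2 = if m = m2 then m else (if rotateCW m = o then rotateCW m else aLoop 0 (rotateCW m) o m2) := rfl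
theorem aLoop0 (m o m2 : List String) : aLoop 0 m o m2 = m := rfl

-- A's loop, under 4-periodicity, tests exactly the four orientations
theorem aLoop_or (mir m2 : List String)
    (h4 : rotateCW (rotateCW (rotateCW (rotateCW mir))) = mir) :
    decide (aLoop 4 mir mir m2 = m2) =
      (decide (mir = m2) || decide (rotateCW mir = m2) ||
       decide (rotateCW (rotateCW mir) = m2) || decide (rotateCW (rotateCW (rotateCW mir)) = m2)) := by
  by_cases h0 : mir = m2
  · simp [aLoop4, h0]
  by_cases h1 : rotateCW mir = mir
  · simp [aLoop4, aLoop3, aLoop2, aLoop1, aLoop0, h0, h1]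
  by_cases h1' : rotateCW mir = m2
  · simp [aLoop4, aLoop3, aLoop2, aLoop1, aLoop0, h0, h1, h1']
  by_cases h2 : rotateCW (rotateCW mir) = mir
  · simp [aLoop4, aLoop3, aLoop2, aLoop1, aLoop0, h0, h1, h1', h2]
  by_cases h2' : rotateCW (rotateCW mir) = m2
  · simp [aLoop4, aLoop3, aLoop2, aLoop1, aLoop0, h0, h1, h1', h2, h2']
  by_cases h3 : rotateCW (rotateCW (rotateCW mir)) = mir
  · simp [aLoop4, aLoop3, aLoop2, aLoop1, aLoop0, h0, h1, h1', h2, h2', h3]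
  by_cases h3' : rotateCW (rotateCW (rotateCW mir)) = m2
  · simp [aLoop4, aLoop3, aLoop2, aLoop1, aLoop0, h0, h1, h1', h2, h2', h3, h3']
  · simp [aLoop4, aLoop3, aLoop2, aLoop1, aLoop0, h0, h1, h1', h2, h2', h3, h3', h4]

-- equality of a list of rows with a known-rectangular list, coordinatewise
theorem eq_coords (X Y : List (List Char)) (rows cols : Nat)
    (hY : Y.length = rows) (hYr : ∀ i, i < rows → (Y.getD i []).length = cols) :
    X = Y ↔ (X.length = rows ∧ ∀ i, i < rows →
      ((X.getD i []).length = cols ∧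
        ∀ j, j < cols → (X.getD i []).getD j ' ' = (Y.getD i []).getD j ' ')) := by
  constructor
  · rintro rfl
    exact ⟨hY, fun i hi => ⟨hYr i hi, fun j hj => rfl⟩⟩
  · rintro ⟨hX, hrows⟩
    apply List.ext_getElem (by rw [hX, hY])
    intro i h1 h2
    have hi : i < rows := by omega
    have hXg : X.getD i [] = X[i] := List.getD_eq_getElem _ _ h1
    have hYg : Y.getD i [] = Y[i] := List.getD_eq_getElem _ _ h2
    obtain ⟨hlen, hel⟩ := hrows i hi
    apply List.ext_getElem
    · rw [← hXg, ← hYg, hlen, hYr i hi]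
    · intro j hj1 hj2
      have hjc : j < cols := by rw [← hXg, hlen] at hj1; exact hj1
      have := hel j hjc
      rwa [hXg, hYg, List.getD_eq_getElem _ _ hj1, List.getD_eq_getElem _ _ hj2] at this

-- bMatch k is equality with any list having the right shape and cells
theorem bMatch_eq (mir m2 Y : List (List Char)) (r c k : Nat)
    (hY : Y.length = (if k % 2 = 0 then r else c))
    (hYr : ∀ i, i < (if k % 2 = 0 then r else c) →
      (Y.getD i []).length = (if k % 2 = 0 then c else r))
    (hYel : ∀ i j, i < (if k % 2 = 0 then r else c) → j < (if k % 2 = 0 then c else r) →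
      (Y.getD i []).getD j ' ' = bCell mir r c k i j) :
    bMatch mir m2 r c k = decide (m2 = Y) := by
  apply Bool.eq_iff_iff.mpr
  unfold bMatch
  simp only [Bool.and_eq_true, List.all_eq_true, List.mem_range, decide_eq_true_eq]
  rw [eq_coords m2 Y _ _ hY hYr]
  constructor
  · rintro ⟨h1, h2⟩
    refine ⟨h1, fun i hi => ?_⟩
    obtain ⟨ha, hb⟩ := h2 i hi
    exact ⟨ha, fun j hj => (hb j hj).trans (hYel i j hi hj).symm⟩
  · rintro ⟨h1, h2⟩
    refine ⟨h1, fun i hi => ?_⟩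
    obtain ⟨ha, hb⟩ := h2 i hi
    exact ⟨ha, fun j hj => (hb j hj).trans (hYel i j hi hj)⟩

-- Pre_ transferred to the mirrored matrix
theorem pre_rev (m1 : List String) (m2 : List String)
    (pre : Pre_matrices_are_mirror_py m1 m2) :
    m1.reverse = [] ∨
      (0 < (m1.reverse.headD "").toList.length ∧
        ∀ s ∈ m1.reverse, s.toList.length = (m1.reverse.headD "").toList.length) := by
  rcases pre with h | ⟨hw, hl⟩
  · subst h; left; rfl
  by_cases hm : m1 = []
  · subst hm; left; rfl
  right
  have hner : m1.reverse ≠ [] := by simpa using hm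
  have hmem : m1.reverse.headD "" ∈ m1 := by
    cases hrev : m1.reverse with
    | nil => exact absurd hrev hner
    | cons a t =>
      have ha : a ∈ m1.reverse := by rw [hrev]; simp
      have := List.mem_reverse.mp ha
      simpa using this
  constructor
  · rw [hl _ hmem]; exact hw
  · intro s hs
    rw [hl s (List.mem_reverse.mp hs), hl _ hmem]

-- B unfolded to the four orientation tests, at the char-matrix level
theorem alt_or (m1 m2 : List String)
    (pre : Pre_matrices_are_mirror_py m1 m2) :
    matrices_are_mirror_py_alt m1 m2 =
      (decide (m1.reverse = m2) || decide (rotateCW m1.reverse = m2) ||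
       decide (rotateCW (rotateCW m1.reverse) = m2) ||
       decide (rotateCW (rotateCW (rotateCW m1.reverse)) = m2)) := by
  have hinj : Function.Injective String.toList := fun a b h => by
    have := congrArg String.ofList h
    simpa [String.ofList_toList] using this
  have hminj : Function.Injective (List.map String.toList) := List.map_injective_iff.mpr hinj
  have hrange : List.range 4 = [0, 1, 2, 3] := rfl
  by_cases hm : m1.reverse = []
  · unfold matrices_are_mirror_py_alt bMatch
    rw [hm]
    simp only [List.map_nil, hrange, List.any_cons, List.any_nil]
    have hrot : rotateCW [] = [] := rfl
    simp [hrot, bCell, eq_comm (a := ([] : List String)),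
      List.length_eq_zero_iff, List.map_eq_nil_iff, eq_comm (a := ([] : List Char))]
  -- rectangular nonempty case
  · have hpre := pre_rev m1 m2 pre
    rcases hpre with h | ⟨hw, hl⟩
    · exact absurd h hm
    set mirS := m1.reverse with hmirS
    set Mc := mirS.map String.toList with hMc
    set M2 := m2.map String.toList with hM2
    have hne : Mc ≠ [] := by simpa [hMc] using hm
    set r := Mc.length with hr
    set c := (Mc.headD []).length with hcdef
    have hceq : c = (mirS.headD "").toList.length := by
      obtain ⟨a, t, hat⟩ := List.exists_cons_of_ne_nil hm
      rw [hcdef, hMc, hat]; simp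
    have hc : 0 < c := hceq ▸ hw
    have hlenC : ∀ row ∈ Mc, row.length = c := by
      intro row hrow
      simp only [hMc, List.mem_map] at hrow
      obtain ⟨s, hs, rfl⟩ := hrow
      rw [hceq]; simpa using hl s hs
    have hr0 : 0 < r := by
      rw [hr]; exact List.length_pos_iff.mpr hne
    -- the four char-level rotations
    have hR1 : rotL Mc = (List.range c).map (fun j => Mc.reverse.map (fun row => row.getD j ' ')) :=
      rotL_rect c Mc hne hlenC
    have hR2 : rotL (rotL Mc) = Mc.reverse.map List.reverse := rotL_two c Mc hne hc hlenC
    have hR2ne : rotL (rotL Mc) ≠ [] := by rw [hR2]; simpa using hne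
    have hR2len : ∀ row ∈ rotL (rotL Mc), row.length = c := by
      rw [hR2]; intro row hrow
      simp only [List.mem_map, List.mem_reverse] at hrow
      obtain ⟨a, ha, rfl⟩ := hrow
      simpa using hlenC a ha
    have hR3 : rotL (rotL (rotL Mc)) =
        (List.range c).map (fun j => (Mc.map List.reverse).map (fun row => row.getD j ' ')) := by
      rw [rotL_rect c (rotL (rotL Mc)) hR2ne hR2len]
      congr 1
      rw [hR2, ← List.map_reverse, List.reverse_reverse]
    -- string-level rotations mapped down to char level
    have e1 : (rotateCW mirS).map String.toList = rotL Mc := by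
      rw [rotateCW_as_rotL, pvMapToListOfList]
    have e2 : (rotateCW (rotateCW mirS)).map String.toList = rotL (rotL Mc) := by
      rw [rotateCW_as_rotL, pvMapToListOfList, e1]
    have e3 : (rotateCW (rotateCW (rotateCW mirS))).map String.toList = rotL (rotL (rotL Mc)) := by
      rw [rotateCW_as_rotL, pvMapToListOfList, e2]
    -- bMatch k = equality with the k-th rotation
    have hb0 : bMatch Mc M2 r c 0 = decide (M2 = Mc) := by
      apply bMatch_eq
      · simp [hr]
      · intro i hi
        simp only [Nat.zero_mod, if_pos rfl] at hi ⊢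
        rw [List.getD_eq_getElem _ _ (hr ▸ hi)]
        exact hlenC _ (List.getElem_mem _)
      · intro i j hi hj
        simp [bCell]
    have hb1 : bMatch Mc M2 r c 1 = decide (M2 = rotL Mc) := by
      apply bMatch_eq <;> rw [hR1]
      · simp
      · intro i hi
        have hi' : i < c := hi
        show (((List.range c).map (fun j => Mc.reverse.map (fun row => row.getD j ' '))).getD i []).length = r
        rw [List.getD_eq_getElem _ _ (by simpa using hi')]
        simp [hr]
      · intro i j hi hj
        have hi' : i < c := hi
        have hj' : j < r := hj
        have hjm : j < Mc.length := hj'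
        rw [show ((List.range c).map (fun jj => Mc.reverse.map (fun row => row.getD jj ' '))).getD i []
              = Mc.reverse.map (fun row => row.getD i ' ') from by
            rw [List.getD_eq_getElem _ _ (by simpa using hi')]; simp]
        rw [show (Mc.reverse.map (fun row => row.getD i ' ')).getD j ' '
              = (Mc[Mc.length - 1 - j]'(by omega)).getD i ' ' from by
            rw [List.getD_eq_getElem _ _ (by simpa using hjm)]
            simp [List.getElem_reverse]]
        simp only [bCell]; norm_num
        rw [List.getElem?_eq_getElem (show r - 1 - j < Mc.length from by omega)]
        simp only [Option.getD_some]
        rfl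
    have hb2 : bMatch Mc M2 r c 2 = decide (M2 = rotL (rotL Mc)) := by
      apply bMatch_eq <;> rw [hR2]
      · simp [hr]
      · intro i hi
        have hi' : i < r := hi
        show ((Mc.reverse.map List.reverse).getD i []).length = c
        rw [List.getD_eq_getElem _ _ (by simpa [hr] using hi')]
        simp only [List.getElem_map, List.getElem_reverse, List.length_reverse]
        simpa using hlenC _ (List.getElem_mem (by omega))
      · intro i j hi hj
        have hi' : i < r := hi
        have hj' : j < c := hj
        have him : i < Mc.length := hi'
        rw [show (Mc.reverse.map List.reverse).getD i []
              = (Mc[Mc.length - 1 - i]'(by omega)).reverse from by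
            rw [List.getD_eq_getElem _ _ (by simpa using him)]
            simp [List.getElem_reverse]]
        have hlenI : (Mc[Mc.length - 1 - i]'(by omega : Mc.length - 1 - i < Mc.length)).length = c :=
          hlenC _ (List.getElem_mem _)
        rw [show ((Mc[Mc.length - 1 - i]'(by omega : Mc.length - 1 - i < Mc.length)).reverse).getD j ' '
              = (Mc[Mc.length - 1 - i]'(by omega : Mc.length - 1 - i < Mc.length))[c - 1 - j]'(by rw [hlenI]; omega) from by
            rw [List.getD_eq_getElem _ _ (by simp only [List.length_reverse, hlenI]; omega)]
            simp only [List.getElem_reverse, hlenI]]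
        simp only [bCell]; norm_num
        have hlenI' : (Mc[r - 1 - i]'(by omega : r - 1 - i < Mc.length)).length = c :=
          hlenC _ (List.getElem_mem _)
        rw [List.getElem?_eq_getElem (show r - 1 - i < Mc.length from by omega)]
        simp only [Option.getD_some]
        rw [List.getElem?_eq_getElem (show c - 1 - j < (Mc[r - 1 - i]'(by omega : r - 1 - i < Mc.length)).length from by rw [hlenI']; omega)]
        simp only [Option.getD_some]
        rfl
    have hb3 : bMatch Mc M2 r c 3 = decide (M2 = rotL (rotL (rotL Mc))) := by
      apply bMatch_eq <;> rw [hR3]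
      · simp
      · intro i hi
        have hi' : i < c := hi
        show (((List.range c).map (fun j => (Mc.map List.reverse).map (fun row => row.getD j ' '))).getD i []).length = r
        rw [List.getD_eq_getElem _ _ (by simpa using hi')]
        simp [hr]
      · intro i j hi hj
        have hi' : i < c := hi
        have hj' : j < r := hj
        have hjm : j < Mc.length := hj'
        rw [show ((List.range c).map (fun jj => (Mc.map List.reverse).map (fun row => row.getD jj ' '))).getD i []
              = (Mc.map List.reverse).map (fun row => row.getD i ' ') from by
            rw [List.getD_eq_getElem _ _ (by simpa using hi')]; simp]
        rw [show ((Mc.map List.reverse).map (fun row => row.getD i ' ')).getD j ' '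
              = ((Mc[j]'hjm).reverse).getD i ' ' from by
            rw [List.getD_eq_getElem _ _ (by simpa using hjm)]; simp]
        have hlenJ : (Mc[j]'hjm).length = c := hlenC _ (List.getElem_mem _)
        rw [show ((Mc[j]'hjm).reverse).getD i ' '
              = (Mc[j]'hjm)[c - 1 - i]'(by rw [hlenJ]; omega) from by
            rw [List.getD_eq_getElem _ _ (by simp only [List.length_reverse, hlenJ]; omega)]
            simp only [List.getElem_reverse, hlenJ]]
        simp only [bCell]; norm_num
        rw [List.getElem?_eq_getElem hjm]
        simp only [Option.getD_some]
        rw [List.getElem?_eq_getElem (show c - 1 - i < (Mc[j]'hjm).length from by rw [hlenJ]; omega)]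
        simp only [Option.getD_some]
    -- flip each equality to the string level
    have flip : ∀ (rot : List String), decide (M2 = rot.map String.toList) = decide (rot = m2) := by
      intro rot
      apply decide_eq_decide.mpr
      rw [hM2]
      exact ⟨fun h => (hminj h).symm, fun h => by rw [h]⟩
    unfold matrices_are_mirror_py_alt
    rw [hrange]
    simp only [List.any_cons, List.any_nil, Bool.or_false]
    rw [← hMc, ← hM2, ← hr, ← hcdef, hb0, hb1, hb2, hb3, ← e3, ← e2, ← e1, hMc]
    rw [flip mirS, flip (rotateCW mirS), flip (rotateCW (rotateCW mirS)),
      flip (rotateCW (rotateCW (rotateCW mirS)))]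
    simp [Bool.or_assoc]


theorem rotateCW_four (m : List String)
    (h : m = [] ∨ (0 < (m.headD "").toList.length ∧
          ∀ s ∈ m, s.toList.length = (m.headD "").toList.length)) :
    rotateCW (rotateCW (rotateCW (rotateCW m))) = m := by
  by_cases hm : m = []
  · subst hm; rfl
  rcases h with h | ⟨hw, hl⟩
  · exact absurd h hm
  have hne : m.map String.toList ≠ [] := by simpa using hm
  have hlen : ∀ r ∈ m.map String.toList, r.length = (m.headD "").toList.length := by
    intro r hr
    simp only [List.mem_map] at hr
    obtain ⟨s, hs, rfl⟩ := hr
    simpa using hl s hs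
  simp only [rotateCW_as_rotL, pvMapToListOfList]
  rw [rotL_four ((m.headD "").toList.length) (m.map String.toList) hne hw hlen]
  simp [List.map_map, Function.comp_def, String.ofList_toList]

-- ===== VERDICT (by name: the statement is the Claim_ definition above) =====
theorem matrices_are_mirror_py_spec : Claim_equal_matrices_are_mirror_py := by
  intro m1 m2 _dom pre
  unfold Spec_matrices_are_mirror_py matrices_are_mirror_py
  rw [alt_or m1 m2 pre]
  exact aLoop_or _ _ (rotateCW_four _ (pre_rev m1 m2 pre))
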